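-- pv_equiv track=rewrite | github.com/BCACTF/bcactf-6.0 | the-ancients/solve/solve.py | verify_encoding
-- ===== SOURCE A (Python) =====
-- def verify_encoding(flag):
--     key1 = 7
--     key2 = 13
--     transformed = []
--
--     # Step 1: Transform characters
--     for i in range(len(flag)):
--         code = ord(flag[i])
--         transformed_val = ((code ^ i) + key1) ^ key2
--         transformed.append(transformed_val)
--
--     # Step 2: Swap pairs
--     i = 0
--     while i < len(transformed) - 1:
--         transformed[i], transformed[i + 1] = transformed[i + 1], transformed[i]
--         i += 2
--
--     # Step 3: Reverse array
--     transformed = transformed[::-1]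
--
--     # Step 4: Create output string
--     result = ''
--     for num in transformed:
--         result += f"{num:02d}"
--
--     return result
-- ===== SOURCE B (Python) =====
-- def verify_encoding(flag):
--     vals = [((ord(ch) ^ i) + 7) ^ 13 for i, ch in enumerate(flag)]
--     chunks = []
--     j = 0
--     while j < len(vals):
--         chunks.append(vals[j:j + 2])
--         j += 2
--     return ''.join(f"{v:02d}" for c in reversed(chunks) for v in c)
-- ===== Notes on version B (the rewrite author's own statement) =====
-- stated objective: simpler
-- what changed: B computes the transformed values with a single enumerate comprehension and replaces A's in-place adjacent-pair swap plus slice reversal by one loop that prepends consecutive 2-chunks, building the final permutation directly.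
import Mathlib
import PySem

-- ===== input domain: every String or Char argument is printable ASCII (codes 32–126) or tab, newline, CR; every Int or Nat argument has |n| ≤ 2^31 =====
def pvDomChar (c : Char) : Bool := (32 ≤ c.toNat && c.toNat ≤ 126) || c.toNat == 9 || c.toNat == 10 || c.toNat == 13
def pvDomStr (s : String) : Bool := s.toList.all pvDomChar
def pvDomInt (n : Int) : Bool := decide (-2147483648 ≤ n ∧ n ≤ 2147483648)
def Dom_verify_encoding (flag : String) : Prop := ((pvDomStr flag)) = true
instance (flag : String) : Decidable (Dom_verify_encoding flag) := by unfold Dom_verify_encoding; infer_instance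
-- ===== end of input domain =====

-- B replaces A's in-place pair-swap + slice reversal by collecting the consecutive
-- 2-chunks of the transformed values and emitting them in reverse order (simpler decomposition, same cost).


-- f"{num:02d}" — Python zero-pads to total width 2; only 0..9 ever gain a pad
-- (negative one-digit numbers already render with width 2). Shared by both ports.
def fmt02 (n : Int) : List Char :=
  if 0 ≤ n ∧ n < 10 then '0' :: PySem.Int.toChars n else PySem.Int.toChars n

-- ===== PORT A =====
-- Step 2 of A: the while loop swapping transformed[i] and transformed[i+1] for i = 0,2,4,…
def aSwapPairs : List Int → List Int
  | a :: b :: r => b :: a :: aSwapPairs r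
  | xs => xs

def verify_encoding (flag : String) : String :=
  -- Step 1: for i in range(len(flag)): transformed.append(((ord(flag[i]) ^ i) + 7) ^ 13)
  let transformed : List Int :=
    (PySem.List.pyRange 0 (PySem.Str.len flag) 1).foldl
      (fun acc i =>
        let code : Int := ((PySem.List.pyGetD flag.toList i ' ').toNat : Int)
        acc ++ [PySem.Int.bxor (PySem.Int.bxor code i + 7) 13]) []
  -- Step 2: swap adjacent pairs in place
  let swapped := aSwapPairs transformed
  -- Step 3: transformed[::-1]
  let rev := (PySem.List.slice? swapped none none (-1)).getD []
  -- Step 4: result += f"{num:02d}"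
  String.ofList (rev.foldl (fun r n => r ++ fmt02 n) [])

-- ===== PORT B =====
-- the while loop: while j < len(vals): chunks.append(vals[j:j+2]); j += 2
def bChunks (vals : List Int) (j : Int) (res : List (List Int)) : List (List Int) :=
  if j < (vals.length : Int) then
    bChunks vals (j + 2) (res ++ [PySem.List.slice vals (some j) (some (j + 2))])
  else res
  termination_by ((vals.length : Int) - j).toNat
  decreasing_by omega

def verify_encoding_alt (flag : String) : String :=
  let vals : List Int :=
    (PySem.List.enumerate flag.toList 0).map
      (fun p => PySem.Int.bxor (PySem.Int.bxor ((p.2.toNat : Int)) p.1 + 7) 13)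
  let chunks := bChunks vals 0 []
  -- ''.join(f"{v:02d}" for c in reversed(chunks) for v in c)
  String.ofList (chunks.reverse.flatMap (fun c => c.flatMap fmt02))

-- ===== PRECONDITION & SPEC =====
def Spec_verify_encoding (flag : String) (out : String) : Prop := out = verify_encoding_alt flag
instance (flag : String) (out : String) : Decidable (Spec_verify_encoding flag out) := by unfold Spec_verify_encoding; infer_instance

-- ===== CLAIM (what is proved, stated in full; the proofs are below) =====
def Claim_equal_verify_encoding : Prop := ∀ (flag : String), Dom_verify_encoding flag → Spec_verify_encoding flag (verify_encoding flag)

-- ===== LEMMAS AND PROOFS =====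

-- The consecutive 2-chunks of a list, structurally.
def chunksRec : List Int → List (List Int)
  | a :: b :: r => [a, b] :: chunksRec r
  | [a] => [[a]]
  | [] => []

-- A's index loop over range(len(flag)) computes the same values as B's enumerate map.
theorem map_pyRange_getD_eq_enumerate {α β : Type} (d : α) (F : Int → α → β) :
    ∀ (rest pre : List α),
      (PySem.List.pyRange (pre.length : Int) ((pre.length : Int) + rest.length) 1).map
        (fun i => F i (PySem.List.pyGetD (pre ++ rest) i d))
      = (PySem.List.enumerate rest (pre.length : Int)).map (fun p => F p.1 p.2) := by
  intro rest
  induction rest with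
  | nil => intro pre; simp [PySem.List.pyRange_one_eq_nil]
  | cons x xs ih =>
    intro pre
    rw [PySem.List.pyRange_one_cons (by push_cast [List.length_cons]; omega)]
    have h1 : PySem.List.pyGetD (pre ++ x :: xs) (pre.length : Int) d = x := by
      rw [PySem.List.pyGetD_eq_getElem _ _ (by positivity)
        (by push_cast [List.length_append, List.length_cons]; omega)]
      simp
    have h2 := ih (pre ++ [x])
    simp only [List.length_append, List.append_assoc, List.singleton_append,
      List.length_cons, List.length_nil] at h2 ⊢
    push_cast at h2 ⊢
    simp only [PySem.List.enumerate_cons, List.map_cons, h1]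
    rw [show (pre.length : Int) + ((xs.length : Int) + 1)
          = (pre.length : Int) + 1 + (xs.length : Int) by ring, h2]

-- B's chunk loop collects exactly the structural 2-chunks of the suffix it scans.
theorem bChunks_eq : ∀ (rest pre : List Int) (res : List (List Int)),
    bChunks (pre ++ rest) (pre.length : Int) res = res ++ chunksRec rest := by
  intro rest
  induction rest using chunksRec.induct with
  | case1 a b r ih =>
    intro pre res
    rw [bChunks, if_pos (by push_cast [List.length_append, List.length_cons, List.length_nil]; omega)]
    have hsl : PySem.List.slice (pre ++ a :: b :: r) (some (pre.length : Int))
        (some ((pre.length : Int) + 2)) = [a, b] := by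
      rw [PySem.List.slice_toNat _ (by positivity) (by positivity),
          show ((pre.length : Int)).toNat = pre.length by omega,
          show (((pre.length : Int) + 2)).toNat - pre.length = 2 by omega,
          List.drop_left]
      simp
    have h2 := ih (pre ++ [a, b]) (res ++ [[a, b]])
    simp only [List.length_append, List.length_cons, List.length_nil,
      List.append_assoc, List.cons_append, List.nil_append] at h2
    push_cast at h2
    rw [hsl, h2]
    simp [chunksRec]
  | case2 a =>
    intro pre res
    rw [bChunks, if_pos (by push_cast [List.length_append, List.length_cons, List.length_nil]; omega)]
    have hsl : PySem.List.slice (pre ++ [a]) (some (pre.length : Int))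
        (some ((pre.length : Int) + 2)) = [a] := by
      rw [PySem.List.slice_toNat _ (by positivity) (by positivity),
          show ((pre.length : Int)).toNat = pre.length by omega,
          show (((pre.length : Int) + 2)).toNat - pre.length = 2 by omega,
          List.drop_left]
      simp
    rw [hsl, bChunks,
        if_neg (by push_cast [List.length_append, List.length_cons, List.length_nil]; omega)]
    simp [chunksRec]
  | case3 =>
    intro pre res
    rw [bChunks, if_neg (by simp)]
    simp [chunksRec]

-- Emitting the reversed chunks is A's pair swap followed by reversal.
theorem chunks_flat : ∀ v : List Int,
    (chunksRec v).reverse.flatMap (fun c => c.flatMap fmt02)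
      = ((aSwapPairs v).reverse).flatMap fmt02 := by
  intro v
  induction v using chunksRec.induct with
  | case1 a b r ih => simp [chunksRec, aSwapPairs, ih]
  | case2 a => simp [chunksRec, aSwapPairs]
  | case3 => simp [chunksRec, aSwapPairs]

-- ===== VERDICT (by name: the statement is the Claim_ definition above) =====
theorem verify_encoding_spec : Claim_equal_verify_encoding := by
  intro flag _
  unfold Spec_verify_encoding verify_encoding verify_encoding_alt
  simp only [PySem.List.slice?_none_none_neg_one, Option.getD_some,
    PySem.List.foldl_append_singleton_eq_map, PySem.List.foldl_append_eq_flatMap,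
    List.nil_append]
  have hvals := map_pyRange_getD_eq_enumerate (' ')
      (fun (i : Int) (c : Char) => PySem.Int.bxor (PySem.Int.bxor ((c.toNat : Int)) i + 7) 13)
      flag.toList []
  simp only [List.length_nil, Nat.cast_zero, List.nil_append, zero_add, PySem.Str.len_eq] at hvals ⊢
  rw [hvals]
  have hch := bChunks_eq ((PySem.List.enumerate flag.toList 0).map
      (fun p => PySem.Int.bxor (PySem.Int.bxor ((p.2.toNat : Int)) p.1 + 7) 13)) []
  simp only [List.length_nil, Nat.cast_zero, List.nil_append] at hch
  rw [hch _, List.nil_append, chunks_flat]
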